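-- pv_equiv track=rewrite | github.com/jonahobw/honors | attack_helper.py | spans_multiple_classifiers
-- ===== SOURCE A (Python) =====
-- def spans_multiple_classifiers(array, class1, class2):
--     # <array>: a 2d array where the first dimension are the leaf classifiers of the nndt
--     # and the second dimension are the classes classified by the leaf classifiers.
--     # class1 and class2 are ints representing two signs
--     # returns a boolean indicating !(class1 and class2 are in the same 2nd-dimension array)
--
--     for subarr in array:
--         # variables indicating if the classes have been found
--         cl1 = class1 in subarr
--         cl2 = class2 in subarr
--         if cl1 and cl2:
--             # 2 signs are in the same leaf classifier, they do NOT span multiple classifiers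
--             return False
--         elif cl1 or cl2:
--             return True
-- ===== SOURCE B (Python) =====
-- def spans_multiple_classifiers(array, class1, class2):
--     # Single full scan recording the first subarray index containing each class,
--     # then combine the two first-occurrence indices.
--     idx1 = None
--     idx2 = None
--     for i, subarr in enumerate(array):
--         if idx1 is None and class1 in subarr:
--             idx1 = i
--         if idx2 is None and class2 in subarr:
--             idx2 = i
--     if idx1 is None and idx2 is None:
--         return None
--     return idx1 != idx2
-- ===== Notes on version B (the rewrite author's own statement) =====
-- stated objective: alternative
-- what changed: Instead of deciding inside the row loop with early returns, B does one full scan recording the first-occurrence row index of each class and afterwards combines the two indices (both absent -> None, equal -> False, otherwise True).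
import Mathlib
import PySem

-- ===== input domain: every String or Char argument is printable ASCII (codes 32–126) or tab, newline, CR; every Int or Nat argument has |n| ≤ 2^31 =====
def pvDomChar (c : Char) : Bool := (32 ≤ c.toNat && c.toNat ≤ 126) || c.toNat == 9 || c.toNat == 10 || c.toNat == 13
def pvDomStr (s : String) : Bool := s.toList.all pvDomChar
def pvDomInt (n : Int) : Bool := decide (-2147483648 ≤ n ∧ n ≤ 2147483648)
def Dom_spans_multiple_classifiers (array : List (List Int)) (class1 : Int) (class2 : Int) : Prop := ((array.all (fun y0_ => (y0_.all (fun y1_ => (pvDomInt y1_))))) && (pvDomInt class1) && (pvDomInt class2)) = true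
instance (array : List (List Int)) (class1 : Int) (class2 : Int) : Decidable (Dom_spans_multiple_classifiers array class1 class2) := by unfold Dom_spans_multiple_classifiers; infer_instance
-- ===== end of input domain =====

-- B replaces A's per-row early-return decision by one full scan that records the
-- first-occurrence row index of each class and combines the two indices at the end
-- (objective: alternative decomposition; same cost).

-- ===== PORT A =====
def spans_multiple_classifiers (array : List (List Int)) (class1 : Int) (class2 : Int) : Option Bool :=
  match array with
  | [] => none
  | subarr :: rest =>
    let cl1 := subarr.contains class1
    let cl2 := subarr.contains class2
    if cl1 && cl2 then some false
    else if cl1 || cl2 then some true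
    else spans_multiple_classifiers rest class1 class2

-- ===== PORT B =====
-- one step of Source B's loop body: set each index the first time its membership test succeeds
def pvAltStep (class1 class2 : Int) (st : Option Int × Option Int) (p : Int × List Int) : Option Int × Option Int :=
  (if st.1.isNone && p.2.contains class1 then some p.1 else st.1,
   if st.2.isNone && p.2.contains class2 then some p.1 else st.2)

def spans_multiple_classifiers_alt (array : List (List Int)) (class1 : Int) (class2 : Int) : Option Bool :=
  let st := (PySem.List.enumerate array).foldl (pvAltStep class1 class2) (none, none)
  match st with
  | (none, none) => none
  | (i1, i2) => some (decide (i1 ≠ i2))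

-- ===== PRECONDITION & SPEC =====
def Spec_spans_multiple_classifiers (array : List (List Int)) (class1 : Int) (class2 : Int) (out : Option Bool) : Prop := out = spans_multiple_classifiers_alt array class1 class2
instance (array : List (List Int)) (class1 : Int) (class2 : Int) (out : Option Bool) : Decidable (Spec_spans_multiple_classifiers array class1 class2 out) := by unfold Spec_spans_multiple_classifiers; infer_instance

-- ===== CLAIM (what is proved, stated in full; the proofs are below) =====
def Claim_equal_spans_multiple_classifiers : Prop := ∀ (array : List (List Int)) (class1 : Int) (class2 : Int), Dom_spans_multiple_classifiers array class1 class2 → Spec_spans_multiple_classifiers array class1 class2 (spans_multiple_classifiers array class1 class2)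

-- ===== LEMMAS AND PROOFS =====

-- once both indices are set, the fold never changes the state
theorem pvAlt_frozen (class1 class2 : Int) (l : List (Int × List Int)) (a b : Int) :
    l.foldl (pvAltStep class1 class2) (some a, some b) = (some a, some b) := by
  induction l with
  | nil => rfl
  | cons p t ih => simpa [pvAltStep] using ih

-- with idx1 already set to a, it stays set and idx2, if set, is an index from the rest
theorem pvAlt_one_set1 (class1 class2 : Int) :
    ∀ (l : List (List Int)) (k a : Int), a < k →
    ((PySem.List.enumerate l k).foldl (pvAltStep class1 class2) (some a, none)).1 = some a ∧
    (((PySem.List.enumerate l k).foldl (pvAltStep class1 class2) (some a, none)).2 = none ∨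
      ∃ j, ((PySem.List.enumerate l k).foldl (pvAltStep class1 class2) (some a, none)).2 = some j ∧ a < j) := by
  intro l
  induction l with
  | nil => intro k a h; exact ⟨rfl, Or.inl rfl⟩
  | cons s t ih =>
    intro k a h
    by_cases hc : class2 ∈ s
    · have hstep : pvAltStep class1 class2 (some a, none) (k, s) = (some a, some k) := by
        simp [pvAltStep, hc]
      rw [PySem.List.enumerate_cons, List.foldl_cons, hstep, pvAlt_frozen]
      exact ⟨rfl, Or.inr ⟨k, rfl, h⟩⟩
    · have hstep : pvAltStep class1 class2 (some a, none) (k, s) = (some a, none) := by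
        simp [pvAltStep, hc]
      rw [PySem.List.enumerate_cons, List.foldl_cons, hstep]
      exact ih (k + 1) a (by omega)

-- symmetric: idx2 already set
theorem pvAlt_one_set2 (class1 class2 : Int) :
    ∀ (l : List (List Int)) (k a : Int), a < k →
    ((PySem.List.enumerate l k).foldl (pvAltStep class1 class2) (none, some a)).2 = some a ∧
    (((PySem.List.enumerate l k).foldl (pvAltStep class1 class2) (none, some a)).1 = none ∨
      ∃ j, ((PySem.List.enumerate l k).foldl (pvAltStep class1 class2) (none, some a)).1 = some j ∧ a < j) := by
  intro l
  induction l with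
  | nil => intro k a h; exact ⟨rfl, Or.inl rfl⟩
  | cons s t ih =>
    intro k a h
    by_cases hc : class1 ∈ s
    · have hstep : pvAltStep class1 class2 (none, some a) (k, s) = (some k, some a) := by
        simp [pvAltStep, hc]
      rw [PySem.List.enumerate_cons, List.foldl_cons, hstep, pvAlt_frozen]
      exact ⟨rfl, Or.inr ⟨k, rfl, h⟩⟩
    · have hstep : pvAltStep class1 class2 (none, some a) (k, s) = (none, some a) := by
        simp [pvAltStep, hc]
      rw [PySem.List.enumerate_cons, List.foldl_cons, hstep]
      exact ih (k + 1) a (by omega)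

-- combine a fold state the way spans_multiple_classifiers_alt does
def pvCombine (st : Option Int × Option Int) : Option Bool :=
  match st with
  | (none, none) => none
  | (i1, i2) => some (decide (i1 ≠ i2))

theorem pvCombine_true1 (r : Option Int × Option Int) (k : Int) (h1 : r.1 = some k)
    (h2 : r.2 = none ∨ ∃ j, r.2 = some j ∧ k < j) : pvCombine r = some true := by
  rcases r with ⟨r1, r2⟩
  dsimp at h1 h2
  subst h1
  rcases h2 with rfl | ⟨j, rfl, hlt⟩
  · simp [pvCombine]
  · simp [pvCombine]
    omega

theorem pvCombine_true2 (r : Option Int × Option Int) (k : Int) (h2 : r.2 = some k)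
    (h1 : r.1 = none ∨ ∃ j, r.1 = some j ∧ k < j) : pvCombine r = some true := by
  rcases r with ⟨r1, r2⟩
  dsimp at h1 h2
  subst h2
  rcases h1 with rfl | ⟨j, rfl, hlt⟩
  · simp [pvCombine]
  · simp [pvCombine]
    omega

theorem pvAlt_main (class1 class2 : Int) :
    ∀ (l : List (List Int)) (k : Int),
    pvCombine ((PySem.List.enumerate l k).foldl (pvAltStep class1 class2) (none, none)) =
      spans_multiple_classifiers l class1 class2 := by
  intro l
  induction l with
  | nil => intro k; rfl
  | cons s t ih =>
    intro k
    by_cases h1 : class1 ∈ s <;> by_cases h2 : class2 ∈ s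
    · have hstep : pvAltStep class1 class2 (none, none) (k, s) = (some k, some k) := by
        simp [pvAltStep, h1, h2]
      rw [PySem.List.enumerate_cons, List.foldl_cons, hstep, pvAlt_frozen]
      simp [pvCombine, spans_multiple_classifiers, h1, h2]
    · have hstep : pvAltStep class1 class2 (none, none) (k, s) = (some k, none) := by
        simp [pvAltStep, h1, h2]
      rw [PySem.List.enumerate_cons, List.foldl_cons, hstep]
      obtain ⟨hfst, hsnd⟩ := pvAlt_one_set1 class1 class2 t (k + 1) k (by omega)
      rw [pvCombine_true1 _ k hfst hsnd]
      simp [spans_multiple_classifiers, h1, h2]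
    · have hstep : pvAltStep class1 class2 (none, none) (k, s) = (none, some k) := by
        simp [pvAltStep, h1, h2]
      rw [PySem.List.enumerate_cons, List.foldl_cons, hstep]
      obtain ⟨hsnd, hfst⟩ := pvAlt_one_set2 class1 class2 t (k + 1) k (by omega)
      rw [pvCombine_true2 _ k hsnd hfst]
      simp [spans_multiple_classifiers, h1, h2]
    · have hstep : pvAltStep class1 class2 (none, none) (k, s) = (none, none) := by
        simp [pvAltStep, h1, h2]
      rw [PySem.List.enumerate_cons, List.foldl_cons, hstep, ih (k + 1)]
      simp [spans_multiple_classifiers, h1, h2]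

-- ===== VERDICT (by name: the statement is the Claim_ definition above) =====
theorem spans_multiple_classifiers_spec : Claim_equal_spans_multiple_classifiers := by
  intro array class1 class2 _
  unfold Spec_spans_multiple_classifiers spans_multiple_classifiers_alt
  exact (pvAlt_main class1 class2 array 0).symm
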